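-- pv_equiv track=rewrite | github.com/CodingThrust/problem-reductions | docs/paper/verify-reductions/adversary_register_sufficiency_sequencing_to_minimize_maximum_cumulative_cost.py | brute_force_target
-- ===== SOURCE A (Python) =====
-- import itertools
--
-- def is_feasible_target(costs, precedences, K, schedule):
--     """Check if schedule achieves max cumulative cost <= K."""
--     n = len(costs)
--     if len(schedule) != n or sorted(schedule) != list(range(n)):
--         return False, None
--
--     positions = {t: i for i, t in enumerate(schedule)}
--     for pred, succ in precedences:
--         if positions[pred] >= positions[succ]:
--             return False, None
--
--     cumulative = 0
--     max_cum = 0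
--     for task in schedule:
--         cumulative += costs[task]
--         if cumulative > max_cum:
--             max_cum = cumulative
--     return max_cum <= K, max_cum
--
-- def brute_force_target(costs, precedences, K):
--     """Find a schedule with max cumulative cost <= K, or None."""
--     n = len(costs)
--     for perm in itertools.permutations(range(n)):
--         schedule = list(perm)
--         ok, max_cum = is_feasible_target(costs, precedences, K, schedule)
--         if ok:
--             return schedule, max_cum
--     return None, None
-- ===== SOURCE B (Python) =====
-- def brute_force_target(costs, precedences, K):
--     """Find a schedule with max cumulative cost <= K, or None.
--
--     Backtracking search: fill positions left to right, trying tasks in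
--     ascending index order, pruning candidates whose predecessors are not
--     yet placed or whose placement pushes the running prefix maximum
--     above K. Since all feasibility conditions are prefix-closed and
--     candidates are tried in ascending order, the first complete schedule
--     found is the lexicographically first feasible one.
--     """
--     n = len(costs)
--     if K < 0:
--         return None, None  # the empty prefix already has cumulative 0 > K
--
--     def dfs(schedule, used, cum, mx):
--         if len(schedule) == n:
--             return schedule, mx
--         for t in range(n):
--             if t in used:
--                 continue
--             if any(p not in used for p, s in precedences if s == t):
--                 continue
--             c = cum + costs[t]
--             m = c if c > mx else mx
--             if m > K:
--                 continue
--             r = dfs(schedule + [t], used | {t}, c, m)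
--             if r is not None:
--                 return r
--         return None
--
--     r = dfs([], set(), 0, 0)
--     return r if r is not None else (None, None)
-- ===== Notes on version B (the rewrite author's own statement) =====
-- stated objective: faster
-- what changed: Replaced exhaustive enumeration of all n! permutations with full per-permutation feasibility checks by a recursive backtracking search that builds the schedule position by position in ascending task order, placing a task only if its predecessors are already placed and the running prefix maximum stays <= K, so whole infeasible subtrees are pruned; the first complete schedule is A's lexicographically first feasible one.
import Mathlib
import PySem

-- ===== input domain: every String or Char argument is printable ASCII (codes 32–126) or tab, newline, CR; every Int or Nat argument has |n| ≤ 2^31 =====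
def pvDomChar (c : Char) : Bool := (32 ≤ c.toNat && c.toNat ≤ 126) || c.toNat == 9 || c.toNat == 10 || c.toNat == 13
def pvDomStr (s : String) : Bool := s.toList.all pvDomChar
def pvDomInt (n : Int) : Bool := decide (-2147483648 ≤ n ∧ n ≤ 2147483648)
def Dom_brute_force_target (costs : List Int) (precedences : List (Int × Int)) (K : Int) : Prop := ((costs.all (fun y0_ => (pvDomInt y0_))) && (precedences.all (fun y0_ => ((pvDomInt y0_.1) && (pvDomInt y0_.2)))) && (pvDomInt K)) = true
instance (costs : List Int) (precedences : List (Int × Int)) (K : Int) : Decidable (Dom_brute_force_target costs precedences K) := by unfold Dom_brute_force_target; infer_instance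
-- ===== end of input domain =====

-- B replaces A's enumeration of all n! permutations (each checked from scratch) by a
-- backtracking search over prefixes that prunes infeasible subtrees (objective: faster).

-- ===== PORT A =====

-- cumulative/max loop of is_feasible_target; carries (cumulative, max_cum).
-- costs[task] is ported as pyGet?/getD: in A 'task' is always an index of 'costs'
-- (schedule is a permutation of range(n)), so IndexError never occurs and this is exact.
def pvCumLoop (costs : List Int) : List Int → Int × Int → Int × Int
  | [], s => s
  | t :: rest, s =>
      let cum' := s.1 + (PySem.List.pyGet? costs t).getD 0
      pvCumLoop costs rest (cum', if cum' > s.2 then cum' else s.2)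

-- positions = {t: i for i, t in enumerate(schedule)}
def pvPositions (schedule : List Int) : PySem.Dict Int Int :=
  (PySem.List.enumerate schedule).foldl (fun d p => d.insert p.2 p.1)
    (PySem.Dict.empty : PySem.Dict Int Int)

-- the 'for pred, succ in precedences' loop; a missing key is a KeyError
-- in Python — those inputs are excluded by Pre_brute_force_target.
def pvPrecLoop (positions : PySem.Dict Int Int) : List (Int × Int) → Bool
  | [] => true
  | q :: rest =>
      match positions.get? q.1, positions.get? q.2 with
      | some x, some y => if x ≥ y then false else pvPrecLoop positions rest
      | _, _ => false

def pvIsFeasible (costs : List Int) (precedences : List (Int × Int)) (K : Int)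
    (schedule : List Int) : Bool × Option Int :=
  if schedule.length ≠ costs.length ∨
      PySem.List.sorted schedule (fun x => x) false ≠ PySem.List.pyRange 0 (costs.length : Int) 1 then
    (false, none)
  else if pvPrecLoop (pvPositions schedule) precedences = false then
    (false, none)
  else
    let r := pvCumLoop costs schedule (0, 0)
    (decide (r.2 ≤ K), some r.2)

-- the 'for perm in itertools.permutations(range(n))' loop with early return
def pvSearchA (costs : List Int) (precedences : List (Int × Int)) (K : Int) :
    List (List Int) → Option (List Int) × Option Int
  | [] => (none, none)
  | p :: ps =>
      let r := pvIsFeasible costs precedences K p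
      if r.1 then (some p, r.2) else pvSearchA costs precedences K ps

def brute_force_target (costs : List Int) (precedences : List (Int × Int)) (K : Int) :
    Option (List Int) × Option Int :=
  pvSearchA costs precedences K
    (PySem.List.permutations (PySem.List.pyRange 0 (costs.length : Int) 1) costs.length)

-- ===== PORT B =====

-- any(p not in used for p, s in precedences if s == t)
def pvMissingPred (used : PySem.Set Int) (t : Int) : List (Int × Int) → Bool
  | [] => false
  | q :: rest =>
      if q.2 == t && !(PySem.Set.contains used q.1) then true else pvMissingPred used t rest

-- dfs(schedule, used, cum, mx) of B; the inner 'for t in range(n)' is the candidate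
-- list argument, recursion depth is the fuel n - len(schedule).
def pvDfs (costs : List Int) (precedences : List (Int × Int)) (K : Int) (n : Nat) :
    Nat → List Int → List Int → PySem.Set Int → Int → Int → Option (List Int × Int)
  | 0, _, schedule, _, _, mx => some (schedule, mx)
  | _ + 1, [], _, _, _, _ => none
  | fuel + 1, t :: ts, schedule, used, cum, mx =>
      if PySem.Set.contains used t then
        pvDfs costs precedences K n (fuel + 1) ts schedule used cum mx
      else if pvMissingPred used t precedences then
        pvDfs costs precedences K n (fuel + 1) ts schedule used cum mx
      else
        let c := cum + (PySem.List.pyGet? costs t).getD 0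
        let m := if c > mx then c else mx
        if m > K then
          pvDfs costs precedences K n (fuel + 1) ts schedule used cum mx
        else
          match pvDfs costs precedences K n fuel (PySem.List.pyRange 0 (n : Int) 1)
              (schedule ++ [t]) (PySem.Set.add used t) c m with
          | some r => some r
          | none => pvDfs costs precedences K n (fuel + 1) ts schedule used cum mx
  termination_by fuel cands _ _ _ _ => (fuel, cands.length)

def brute_force_target_alt (costs : List Int) (precedences : List (Int × Int)) (K : Int) :
    Option (List Int) × Option Int :=
  if K < 0 then (none, none)
  else
    match pvDfs costs precedences K costs.length costs.length
        (PySem.List.pyRange 0 (costs.length : Int) 1) [] (PySem.Set.empty : PySem.Set Int) 0 0 with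
    | some r => (some r.1, some r.2)
    | none => (none, none)

-- ===== PRECONDITION & SPEC =====

-- Pre_ excludes exactly the inputs on which A raises KeyError: a precedence pair with an
-- endpoint outside 0..n-1 is looked up in 'positions' (whose keys are exactly 0..n-1) as
-- soon as some permutation's scan reaches it, which happens unless the in-range pairs
-- listed before the first such pair are unsatisfiable (contain a 'stuck' set S in which
-- every task has a predecessor in S, e.g. a self-loop or a cycle).
def Pre_brute_force_target (costs : List Int) (precedences : List (Int × Int)) (K : Int) : Prop :=
  (∀ q ∈ precedences, 0 ≤ q.1 ∧ q.1 < (costs.length : Int) ∧ 0 ≤ q.2 ∧ q.2 < (costs.length : Int)) ∨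
  (∃ S : Finset (Fin costs.length), S.Nonempty ∧
    ∀ b ∈ S, ∃ q ∈ precedences.takeWhile (fun q =>
        decide (0 ≤ q.1 ∧ q.1 < (costs.length : Int) ∧ 0 ≤ q.2 ∧ q.2 < (costs.length : Int))),
      q.2 = ((b : Nat) : Int) ∧ ∃ a ∈ S, q.1 = ((a : Nat) : Int))

instance (costs : List Int) (precedences : List (Int × Int)) (K : Int) :
    Decidable (Pre_brute_force_target costs precedences K) := by
  unfold Pre_brute_force_target; infer_instance

def pvWitness_brute_force_target : List Int × (List (Int × Int)) × Int := ([1, 2], [(0, 1)], 3)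

def Spec_brute_force_target (costs : List Int) (precedences : List (Int × Int)) (K : Int)
    (out : Option (List Int) × Option Int) : Prop := out = brute_force_target_alt costs precedences K

instance (costs : List Int) (precedences : List (Int × Int)) (K : Int)
    (out : Option (List Int) × Option Int) : Decidable (Spec_brute_force_target costs precedences K out) := by
  unfold Spec_brute_force_target; infer_instance

-- ===== CLAIM (what is proved, stated in full; the proofs are below) =====
def Claim_equal_brute_force_target : Prop := ∀ (costs : List Int) (precedences : List (Int × Int)) (K : Int), Dom_brute_force_target costs precedences K → Pre_brute_force_target costs precedences K → Spec_brute_force_target costs precedences K (brute_force_target costs precedences K)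

-- ===== LEMMAS AND PROOFS =====

-- range(n) as a list
def pvR (n : Nat) : List Int := PySem.List.pyRange 0 (n : Int) 1

-- the tasks still to be scheduled, in ascending order
def pvAvail (n : Nat) (schedule : List Int) : List Int :=
  (pvR n).filter (fun x => !decide (x ∈ schedule))

-- 'first feasible' selector: what A keeps of one permutation
def pvFeasP (costs : List Int) (precedences : List (Int × Int)) (K : Int)
    (p : List Int) : Option (List Int × Int) :=
  match pvIsFeasible costs precedences K p with
  | (true, some m) => some (p, m)
  | _ => none

-- prefix precedence soundness: every scheduled task has its predecessors earlier
def pvPPO (precedences : List (Int × Int)) (s : List Int) : Prop :=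
  ∀ q ∈ precedences, ∀ (j : Nat) (hj : j < s.length), s[j] = q.2 → q.1 ∈ s.take j

-- loop invariant of B's dfs
def pvInv (costs : List Int) (precedences : List (Int × Int)) (K : Int)
    (schedule : List Int) (used : PySem.Set Int) (cum mx : Int) : Prop :=
  schedule.Nodup ∧ (∀ t ∈ schedule, t ∈ pvR costs.length) ∧
  (∀ x : Int, PySem.Set.contains used x = true ↔ x ∈ schedule) ∧
  pvCumLoop costs schedule (0, 0) = (cum, mx) ∧ mx ≤ K ∧ pvPPO precedences schedule


-- ---- basic facts about range(n) ----

theorem pvR_nodup (n : Nat) : (pvR n).Nodup := by unfold pvR; exact PySem.List.nodup_pyRange_one 0 (n : Int)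

theorem pvR_length (n : Nat) : (pvR n).length = n := by
  simp [pvR, PySem.List.length_pyRange_one]

theorem mem_pvR {n : Nat} {x : Int} : x ∈ pvR n ↔ 0 ≤ x ∧ x < (n : Int) := by
  simpa [pvR] using PySem.List.mem_pyRange_one (a := 0) (b := (n : Int)) (x := x)

-- ---- itertools.permutations over a duplicate-free list ----

theorem pvFlatMap_range_eraseIdx {β : Type} (xs : List Int) (h : xs.Nodup)
    (g : Int → List Int → List β) :
    (List.range xs.length).flatMap
        (fun i => match xs[i]? with | none => [] | some y => g y (xs.eraseIdx i))
      = xs.flatMap (fun y => g y (xs.erase y)) := by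
  induction xs generalizing g with
  | nil => simp
  | cons x tail ih =>
    have hx : x ∉ tail := (List.nodup_cons.mp h).1
    have htail : tail.Nodup := (List.nodup_cons.mp h).2
    rw [List.length_cons, List.range_succ_eq_map, List.flatMap_cons, List.flatMap_map]
    have hbody : (fun i => match (x :: tail)[i + 1]? with
        | none => ([] : List β)
        | some y => g y ((x :: tail).eraseIdx (i + 1)))
        = (fun i => match tail[i]? with
        | none => ([] : List β)
        | some y => (fun y r => g y (x :: r)) y (tail.eraseIdx i)) := by
      funext i; simp
    rw [hbody, ih htail (fun y r => g y (x :: r))]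
    rw [List.flatMap_cons]
    congr 1
    · simp
    · apply List.flatMap_congr
      intro y hy
      have hyx : x ≠ y := fun he => hx (he ▸ hy)
      rw [List.erase_cons, if_neg (by simpa using hyx)]

theorem pvPermutations_succ (xs : List Int) (h : xs.Nodup) (r : Nat) :
    PySem.List.permutations xs (r + 1)
      = xs.flatMap (fun y => (PySem.List.permutations (xs.erase y) r).map (y :: ·)) := by
  have : PySem.List.permutations xs (r + 1)
      = (List.range xs.length).flatMap
          (fun i => match xs[i]? with
            | none => []
            | some y => (PySem.List.permutations (xs.eraseIdx i) r).map (y :: ·)) := by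
    rw [PySem.List.permutations]
    apply List.flatMap_congr; intro i _
    cases xs[i]? <;> rfl
  rw [this, pvFlatMap_range_eraseIdx xs h (fun y rest => (PySem.List.permutations rest r).map (y :: ·))]


-- ---- the positions dictionary ----

theorem pvPositions_get? (schedule : List Int) (h : schedule.Nodup) (a : Int)
    (ha : a ∈ schedule) :
    (pvPositions schedule).get? a = some ((schedule.idxOf a : Nat) : Int) := by
  have hitems : (pvPositions schedule).items
      = (PySem.List.enumerate schedule).map (fun p => (p.2, p.1)) := by
    unfold pvPositions
    rw [PySem.Dict.items_foldl_insert_fresh (k := fun p => p.2) (v := fun p => p.1)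
      (l := PySem.List.enumerate schedule) (d := PySem.Dict.empty)
      (by intro p _; simp [PySem.Dict.contains_empty])
      (by rw [PySem.List.map_snd_enumerate]; exact h)]
    simp [PySem.Dict.empty]
  have hkeys : (pvPositions schedule).keys = schedule := by
    show (pvPositions schedule).items.map (·.1) = schedule
    rw [hitems, List.map_map]
    have hcomp : ((fun x : Int × Int => x.1) ∘ fun p : Int × Int => (p.2, p.1))
        = (fun p : Int × Int => p.2) := rfl
    rw [hcomp, PySem.List.map_snd_enumerate]
  have hj : schedule.idxOf a < schedule.length := List.idxOf_lt_length_of_mem ha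
  have hmem : (a, ((schedule.idxOf a : Nat) : Int)) ∈ (pvPositions schedule).items := by
    rw [hitems]
    refine List.mem_map.mpr ⟨(((schedule.idxOf a : Nat) : Int), a), ?_, rfl⟩
    rw [PySem.List.mem_enumerate_iff]
    exact ⟨schedule.idxOf a, hj, by simp [List.getElem_idxOf hj]⟩
  exact PySem.Dict.get?_of_mem_items _ hmem (by rw [hkeys]; exact h)

-- ---- the precedence-checking loop ----

theorem pvPrecLoop_true_iff (d : PySem.Dict Int Int) (l : List (Int × Int)) :
    pvPrecLoop d l = true
      ↔ ∀ q ∈ l, ∃ x y : Int, d.get? q.1 = some x ∧ d.get? q.2 = some y ∧ x < y := by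
  induction l with
  | nil => simp [pvPrecLoop]
  | cons q rest ih =>
    rw [pvPrecLoop]
    cases hx : d.get? q.1 <;> cases hy : d.get? q.2 <;> simp_all

-- ---- the cumulative-cost loop ----

theorem pvCumLoop_append (costs : List Int) (l1 l2 : List Int) (s : Int × Int) :
    pvCumLoop costs (l1 ++ l2) s = pvCumLoop costs l2 (pvCumLoop costs l1 s) := by
  induction l1 generalizing s with
  | nil => simp [pvCumLoop]
  | cons t r ih => simp only [List.cons_append, pvCumLoop]; exact ih _

theorem pvCumLoop_mono (costs : List Int) (l : List Int) (s : Int × Int) :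
    s.2 ≤ (pvCumLoop costs l s).2 := by
  induction l generalizing s with
  | nil => simp [pvCumLoop]
  | cons t r ih =>
    simp only [pvCumLoop]
    refine le_trans ?_ (ih _)
    dsimp only
    split <;> omega

-- ---- prefix precedence order ----

theorem pvPPO_nil (precedences : List (Int × Int)) : pvPPO precedences [] := by
  intro q hq j hj
  simp at hj

theorem pvPPO_append_singleton (precedences : List (Int × Int)) (s : List Int) (t : Int) :
    pvPPO precedences (s ++ [t])
      ↔ pvPPO precedences s ∧ ∀ q ∈ precedences, q.2 = t → q.1 ∈ s := by
  constructor
  · intro hp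
    constructor
    · intro q hq j hj hel
      have hj' : j < (s ++ [t]).length := by simp; omega
      have := hp q hq j hj' (by rw [List.getElem_append_left hj]; exact hel)
      rwa [List.take_append_of_le_length (le_of_lt hj)] at this
    · intro q hq hqt
      have hj' : s.length < (s ++ [t]).length := by simp
      have := hp q hq s.length hj' (by simp [hqt])
      rwa [List.take_append_of_le_length (le_refl _), List.take_length] at this
  · rintro ⟨h1, h2⟩ q hq j hj hel
    have hjle : j < s.length + 1 := by simpa using hj
    by_cases hjs : j < s.length
    · rw [List.getElem_append_left hjs] at hel
      rw [List.take_append_of_le_length (le_of_lt hjs)]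
      exact h1 q hq j hjs hel
    · have hje : j = s.length := by omega
      subst hje
      rw [List.getElem_append_right (le_refl _)] at hel
      simp at hel
      rw [List.take_append_of_le_length (le_refl _), List.take_length]
      exact h2 q hq hel.symm

-- ---- B's predecessor test ----

theorem pvMissingPred_false_iff (used : PySem.Set Int) (t : Int) (l : List (Int × Int)) :
    pvMissingPred used t l = false
      ↔ ∀ q ∈ l, q.2 = t → PySem.Set.contains used q.1 = true := by
  induction l with
  | nil => simp [pvMissingPred]
  | cons q rest ih =>
    rw [pvMissingPred]
    cases hq : (q.2 == t) with
    | false =>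
      have hqt : q.2 ≠ t := by simpa using hq
      rw [if_neg (by simp [hq]), ih]
      constructor
      · intro h q' hm hq2
        rcases List.mem_cons.mp hm with rfl | hm
        · exact absurd hq2 hqt
        · exact h q' hm hq2
      · intro h q' hm hq2
        exact h q' (List.mem_cons_of_mem _ hm) hq2
    | true =>
      have hqt : q.2 = t := by simpa using hq
      cases hc : PySem.Set.contains used q.1 with
      | false =>
        rw [if_pos (by simp [hq, hc])]
        simp only [Bool.true_eq_false, false_iff]
        intro h
        have := h q (by simp) hqt
        rw [hc] at this
        exact absurd this (by simp)
      | true =>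
        rw [if_neg (by simp [hc]), ih]
        constructor
        · intro h q' hm hq2
          rcases List.mem_cons.mp hm with rfl | hm
          · exact hc
          · exact h q' hm hq2
        · intro h q' hm hq2
          exact h q' (List.mem_cons_of_mem _ hm) hq2


-- ---- is_feasible_target on a permutation of range(n) ----

theorem pvIsFeasible_eq_of_perm (costs : List Int) (precedences : List (Int × Int)) (K : Int)
    {p : List Int} (hp : p.Perm (pvR costs.length)) :
    pvIsFeasible costs precedences K p =
      if pvPrecLoop (pvPositions p) precedences = false then (false, none)
      else (decide ((pvCumLoop costs p (0, 0)).2 ≤ K), some (pvCumLoop costs p (0, 0)).2) := by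
  have hlen : p.length = costs.length := by rw [hp.length_eq, pvR_length]
  have hsorted : PySem.List.sorted p (fun x => x) false
      = PySem.List.pyRange 0 (costs.length : Int) 1 :=
    PySem.List.sorted_eq_of_perm_of_pairwise_lt _ _ _ hp.symm
      (PySem.List.pairwise_lt_pyRange_one 0 _)
  unfold pvIsFeasible
  rw [if_neg (by push_neg; exact ⟨hlen, hsorted⟩)]

theorem pvFeasP_none_of_fst_false {costs : List Int} {precedences : List (Int × Int)} {K : Int}
    {p : List Int} (h : (pvIsFeasible costs precedences K p).1 = false) :
    pvFeasP costs precedences K p = none := by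
  unfold pvFeasP
  rcases hres : pvIsFeasible costs precedences K p with ⟨b, o⟩
  rw [hres] at h
  simp only at h
  subst h
  cases o <;> rfl

theorem pvFeasP_none_of_cost {costs : List Int} {precedences : List (Int × Int)} {K : Int}
    {p : List Int} (hc : K < (pvCumLoop costs p (0, 0)).2) :
    pvFeasP costs precedences K p = none := by
  apply pvFeasP_none_of_fst_false
  unfold pvIsFeasible
  split_ifs <;> simp <;> omega

theorem pvFeasP_none_of_K_neg {costs : List Int} {precedences : List (Int × Int)} {K : Int}
    {p : List Int} (hK : K < 0) : pvFeasP costs precedences K p = none := by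
  apply pvFeasP_none_of_cost
  have := pvCumLoop_mono costs p (0, 0)
  simp only at this
  omega

theorem pvPrecLoop_true_of_PPO {costs : List Int} {precedences : List (Int × Int)}
    {p : List Int} (hp : p.Perm (pvR costs.length))
    (hpre : ∀ q ∈ precedences, 0 ≤ q.1 ∧ q.1 < (costs.length : Int) ∧ 0 ≤ q.2 ∧ q.2 < (costs.length : Int))
    (hppo : pvPPO precedences p) :
    pvPrecLoop (pvPositions p) precedences = true := by
  have hnd : p.Nodup := (hp.nodup_iff).mpr (pvR_nodup _)
  rw [pvPrecLoop_true_iff]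
  intro q hq
  obtain ⟨h1, h2, h3, h4⟩ := hpre q hq
  have hq1p : q.1 ∈ p := hp.mem_iff.mpr (mem_pvR.mpr ⟨h1, h2⟩)
  have hq2p : q.2 ∈ p := hp.mem_iff.mpr (mem_pvR.mpr ⟨h3, h4⟩)
  refine ⟨p.idxOf q.1, p.idxOf q.2, pvPositions_get? p hnd _ hq1p,
    pvPositions_get? p hnd _ hq2p, ?_⟩
  have hj : p.idxOf q.2 < p.length := List.idxOf_lt_length_of_mem hq2p
  have htake := hppo q hq (p.idxOf q.2) hj (List.getElem_idxOf hj)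
  obtain ⟨i, hi, hpi⟩ := List.mem_take_iff_getElem.mp htake
  have hieq : p.idxOf q.1 = i := by
    rw [← hpi]
    exact List.Nodup.idxOf_getElem hnd i _
  have : p.idxOf q.1 < p.idxOf q.2 := by omega
  exact_mod_cast this

theorem pvFeasP_none_of_violation {costs : List Int} {precedences : List (Int × Int)} {K : Int}
    {p : List Int} {q : Int × Int} (hp : p.Perm (pvR costs.length)) (hq : q ∈ precedences)
    (h1 : q.1 ∈ p) (h2 : q.2 ∈ p) (hviol : p.idxOf q.2 ≤ p.idxOf q.1) :
    pvFeasP costs precedences K p = none := by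
  have hnd : p.Nodup := (hp.nodup_iff).mpr (pvR_nodup _)
  apply pvFeasP_none_of_fst_false
  rw [pvIsFeasible_eq_of_perm costs precedences K hp]
  rw [if_pos ?_]
  · by_contra hne
    have htrue : pvPrecLoop (pvPositions p) precedences = true := by
      cases h : pvPrecLoop (pvPositions p) precedences
      · exact absurd h hne
      · rfl
    obtain ⟨x, y, hx, hy, hlt⟩ := (pvPrecLoop_true_iff _ _).mp htrue q hq
    rw [pvPositions_get? p hnd _ h1] at hx
    rw [pvPositions_get? p hnd _ h2] at hy
    have hx' : x = (p.idxOf q.1 : Int) := by injection hx.symm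
    have hy' : y = (p.idxOf q.2 : Int) := by injection hy.symm
    subst hx' hy'
    have : (p.idxOf q.2 : Int) ≤ (p.idxOf q.1 : Int) := by exact_mod_cast hviol
    omega

-- ---- the search loop of A as findSome? ----

theorem pvIsFeasible_cases (costs : List Int) (precedences : List (Int × Int)) (K : Int)
    (p : List Int) :
    pvIsFeasible costs precedences K p = (false, none) ∨
    pvIsFeasible costs precedences K p
      = (decide ((pvCumLoop costs p (0, 0)).2 ≤ K), some (pvCumLoop costs p (0, 0)).2) := by
  unfold pvIsFeasible
  split_ifs <;> simp

theorem pvSearchA_eq (costs : List Int) (precedences : List (Int × Int)) (K : Int)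
    (L : List (List Int)) :
    pvSearchA costs precedences K L
      = match L.findSome? (pvFeasP costs precedences K) with
        | some r => (some r.1, some r.2)
        | none => (none, none) := by
  induction L with
  | nil => simp [pvSearchA]
  | cons p ps ih =>
    rw [pvSearchA]
    rcases pvIsFeasible_cases costs precedences K p with hc | hc
    · have hfp : pvFeasP costs precedences K p = none :=
        pvFeasP_none_of_fst_false (by rw [hc])
      simp only [hc, List.findSome?_cons, hfp]
      simpa using ih
    · by_cases hK : (pvCumLoop costs p (0, 0)).2 ≤ K
      · have hfp : pvFeasP costs precedences K p = some (p, (pvCumLoop costs p (0, 0)).2) := by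
          unfold pvFeasP
          rw [hc]
          simp [hK]
        simp [hc, hK, List.findSome?_cons, hfp]
      · have hfp : pvFeasP costs precedences K p = none :=
          pvFeasP_none_of_fst_false (by rw [hc]; simpa using hK)
        simp only [hc, List.findSome?_cons, hfp]
        simpa [hK] using ih

-- ---- the available-task list ----

theorem pvAvail_nil (n : Nat) : pvAvail n [] = pvR n := by simp [pvAvail]

theorem pvAvail_nodup (n : Nat) (s : List Int) : (pvAvail n s).Nodup :=
  (pvR_nodup n).filter _

theorem pvAvail_length (n : Nat) (s : List Int) (hnd : s.Nodup)
    (hsub : ∀ t ∈ s, t ∈ pvR n) : (pvAvail n s).length + s.length = n := by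
  have hperm := List.filter_append_perm (fun x => decide (x ∈ s)) (pvR n)
  have h1 : ((pvR n).filter (fun x => decide (x ∈ s))).Perm s := by
    rw [List.perm_ext_iff_of_nodup ((pvR_nodup n).filter _) hnd]
    intro x
    simp only [List.mem_filter, decide_eq_true_eq]
    exact ⟨fun h => h.2, fun h => ⟨hsub x h, h⟩⟩
  have hlen := hperm.length_eq
  rw [List.length_append, pvR_length, h1.length_eq] at hlen
  unfold pvAvail
  omega

theorem pvAvail_erase (n : Nat) (s : List Int) (t : Int) :
    (pvAvail n s).erase t = pvAvail n (s ++ [t]) := by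
  rw [List.Nodup.erase_eq_filter (pvAvail_nodup n s) t]
  unfold pvAvail
  rw [List.filter_filter]
  congr 1
  funext x
  by_cases h1 : x ∈ s <;> by_cases h2 : x = t <;> simp [h1, h2]

theorem pvFull_perm (n : Nat) (s : List Int) (hnd : s.Nodup)
    (hsub : ∀ t ∈ s, t ∈ pvR n) (hlen : s.length = n) : s.Perm (pvR n) :=
  List.Subperm.perm_of_length_le (List.Nodup.subperm hnd (fun _ h => hsub _ h))
    (by rw [pvR_length, hlen])


-- ---- the permutation of range(n) determined by a feasible extension ----

theorem pvFilter_mem_perm (n : Nat) (s : List Int) (hnd : s.Nodup)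
    (hsub : ∀ t ∈ s, t ∈ pvR n) :
    ((pvR n).filter (fun x => decide (x ∈ s))).Perm s := by
  rw [List.perm_ext_iff_of_nodup ((pvR_nodup n).filter _) hnd]
  intro x
  simp only [List.mem_filter, decide_eq_true_eq]
  exact ⟨fun h => h.2, fun h => ⟨hsub x h, h⟩⟩

theorem pvExt_perm (n : Nat) (schedule c : List Int) (t : Int) (hnd : schedule.Nodup)
    (hsub : ∀ x ∈ schedule, x ∈ pvR n) (htav : t ∈ pvAvail n schedule)
    (hc : c.Perm (pvAvail n (schedule ++ [t]))) :
    (schedule ++ t :: c).Perm (pvR n) := by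
  have h1 : (t :: c).Perm (pvAvail n schedule) := by
    rw [← pvAvail_erase] at hc
    exact (hc.cons t).trans (List.perm_cons_erase htav).symm
  have h2 : (schedule ++ t :: c).Perm (schedule ++ pvAvail n schedule) :=
    List.Perm.append_left _ h1
  have h3 : (schedule ++ pvAvail n schedule).Perm (pvR n) := by
    have hperm := List.filter_append_perm (fun x => decide (x ∈ schedule)) (pvR n)
    exact (((pvFilter_mem_perm n schedule hnd hsub).symm.append_right _).trans hperm)
  exact h2.trans h3

-- a completion whose head task still has an unscheduled predecessor is infeasible
theorem pvFeasP_none_of_missing_pred (costs : List Int) (precedences : List (Int × Int))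
    (K : Int)
    (hpre : ∀ q ∈ precedences, 0 ≤ q.1 ∧ q.1 < (costs.length : Int) ∧ 0 ≤ q.2 ∧ q.2 < (costs.length : Int))
    (schedule c : List Int) (t : Int) (q : Int × Int)
    (hnd : schedule.Nodup) (hsub : ∀ x ∈ schedule, x ∈ pvR costs.length)
    (htav : t ∈ pvAvail costs.length schedule)
    (hc : c.Perm (pvAvail costs.length (schedule ++ [t])))
    (hqmem : q ∈ precedences) (hq2 : q.2 = t) (hq1 : q.1 ∉ schedule) :
    pvFeasP costs precedences K (schedule ++ t :: c) = none := by
  have hp : (schedule ++ t :: c).Perm (pvR costs.length) :=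
    pvExt_perm costs.length schedule c t hnd hsub htav hc
  have hpnd : (schedule ++ t :: c).Nodup := (hp.nodup_iff).mpr (pvR_nodup _)
  obtain ⟨hb1, hb2, hb3, hb4⟩ := hpre q hqmem
  have hq1p : q.1 ∈ schedule ++ t :: c := hp.mem_iff.mpr (mem_pvR.mpr ⟨hb1, hb2⟩)
  have hq2p : q.2 ∈ schedule ++ t :: c := by
    rw [hq2]; exact List.mem_append_right _ (by simp)
  -- index of t is schedule.length
  have hlt : schedule.length < (schedule ++ t :: c).length := by simp
  have hgett : (schedule ++ t :: c)[schedule.length] = t := by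
    rw [List.getElem_append_right (le_refl _)]
    simp
  have hidxt : (schedule ++ t :: c).idxOf t = schedule.length := by
    have h := List.Nodup.idxOf_getElem hpnd schedule.length hlt
    rwa [hgett] at h
  -- index of q.1 is at least schedule.length
  have hidx1 : schedule.length ≤ (schedule ++ t :: c).idxOf q.1 := by
    by_contra hlt1
    push_neg at hlt1
    have hi : (schedule ++ t :: c).idxOf q.1 < (schedule ++ t :: c).length :=
      List.idxOf_lt_length_of_mem hq1p
    have := List.getElem_idxOf hi
    rw [List.getElem_append_left hlt1] at this
    exact hq1 (this ▸ List.getElem_mem _)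
  apply pvFeasP_none_of_violation hp hqmem hq1p hq2p
  rw [hq2, hidxt]
  exact hidx1

-- ---- the main correspondence: B's dfs = A's scan of the remaining lex block ----

theorem pvDfs_eq (costs : List Int) (precedences : List (Int × Int)) (K : Int)
    (hpre : ∀ q ∈ precedences, 0 ≤ q.1 ∧ q.1 < (costs.length : Int) ∧ 0 ≤ q.2 ∧ q.2 < (costs.length : Int)) :
    ∀ (fuel : Nat) (schedule : List Int) (used : PySem.Set Int) (cum mx : Int),
      pvInv costs precedences K schedule used cum mx →
      schedule.length + fuel = costs.length →
      pvDfs costs precedences K costs.length fuel (pvR costs.length) schedule used cum mx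
        = ((PySem.List.permutations (pvAvail costs.length schedule) fuel).map
            (fun c => schedule ++ c)).findSome? (pvFeasP costs precedences K) := by
  intro fuel
  induction fuel with
  | zero =>
    intro schedule used cum mx hinv hlen
    obtain ⟨hnd, hsub, hused, hcum, hmx, hppo⟩ := hinv
    have hfull : schedule.length = costs.length := by omega
    have hperm := pvFull_perm costs.length schedule hnd hsub hfull
    have havail : pvAvail costs.length schedule = [] := by
      have := pvAvail_length costs.length schedule hnd hsub
      exact List.eq_nil_of_length_eq_zero (by omega)
    rw [havail]
    have hfeas : pvFeasP costs precedences K schedule = some (schedule, mx) := by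
      unfold pvFeasP
      rw [pvIsFeasible_eq_of_perm costs precedences K hperm,
        if_neg (by rw [pvPrecLoop_true_of_PPO hperm hpre hppo]; simp), hcum]
      simp [hmx]
    simp only [pvDfs]
    show some (schedule, mx) = _
    have : PySem.List.permutations ([] : List Int) 0 = [[]] := rfl
    rw [this]
    simp [hfeas]
  | succ fuel ih =>
    intro schedule used cum mx hinv hlen
    obtain ⟨hnd, hsub, hused, hcum, hmx, hppo⟩ := hinv
    have havail_len : (pvAvail costs.length schedule).length = fuel + 1 := by
      have := pvAvail_length costs.length schedule hnd hsub
      omega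
    have LOOP : ∀ cands : List Int, cands.Nodup → (∀ t ∈ cands, t ∈ pvR costs.length) →
        pvDfs costs precedences K costs.length (fuel + 1) cands schedule used cum mx
          = ((cands.filter (fun x => !decide (x ∈ schedule))).flatMap
              (fun t => (PySem.List.permutations (pvAvail costs.length (schedule ++ [t])) fuel).map
                (fun c => schedule ++ t :: c))).findSome? (pvFeasP costs precedences K) := by
      intro cands
      induction cands with
      | nil => intro _ _; simp [pvDfs]
      | cons t ts ihc =>
        intro hcnd hcsub
        have htnotts : t ∉ ts := (List.nodup_cons.mp hcnd).1
        have htsnd : ts.Nodup := (List.nodup_cons.mp hcnd).2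
        have htssub : ∀ x ∈ ts, x ∈ pvR costs.length := fun x hx => hcsub x (by simp [hx])
        have htR : t ∈ pvR costs.length := hcsub t (by simp)
        by_cases hmem : t ∈ schedule
        · -- t already scheduled: both sides skip it
          have hcont : PySem.Set.contains used t = true := (hused t).mpr hmem
          have hfilter : (t :: ts).filter (fun x => !decide (x ∈ schedule))
              = ts.filter (fun x => !decide (x ∈ schedule)) := by
            simp [List.filter_cons, hmem]
          rw [hfilter, ← ihc htsnd htssub]
          simp only [pvDfs, hcont]
          rfl
        · have hcont : PySem.Set.contains used t = false := by
            cases h : PySem.Set.contains used t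
            · rfl
            · exact absurd ((hused t).mp h) hmem
          have hfilter : (t :: ts).filter (fun x => !decide (x ∈ schedule))
              = t :: ts.filter (fun x => !decide (x ∈ schedule)) := by
            simp [List.filter_cons, hmem]
          rw [hfilter, List.flatMap_cons, List.findSome?_append]
          have htav : t ∈ pvAvail costs.length schedule := by
            unfold pvAvail
            rw [List.mem_filter]
            simp [htR, hmem]
          have hav'len : (pvAvail costs.length (schedule ++ [t])).length = fuel := by
            rw [← pvAvail_erase, List.length_erase_of_mem htav, havail_len]
            omega
          have hcperm : ∀ c ∈ PySem.List.permutations (pvAvail costs.length (schedule ++ [t])) fuel,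
              c.Perm (pvAvail costs.length (schedule ++ [t])) := by
            intro c hcmem
            apply PySem.List.perm_of_mem_permutations
            rwa [hav'len]
          by_cases hmiss : pvMissingPred used t precedences = true
          · -- an unscheduled predecessor: the whole block is infeasible
            have hnone : ((PySem.List.permutations (pvAvail costs.length (schedule ++ [t])) fuel).map
                (fun c => schedule ++ t :: c)).findSome? (pvFeasP costs precedences K) = none := by
              rw [List.findSome?_eq_none_iff]
              intro p hpmem
              obtain ⟨c, hcmem, rfl⟩ := List.mem_map.mp hpmem
              have hnotall : ¬ ∀ q ∈ precedences, q.2 = t → PySem.Set.contains used q.1 = true := by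
                rw [← pvMissingPred_false_iff]
                simp [hmiss]
              push_neg at hnotall
              obtain ⟨q, hqmem, hq2, hq1c⟩ := hnotall
              have hq1 : q.1 ∉ schedule := fun hin => hq1c ((hused q.1).mpr hin)
              exact pvFeasP_none_of_missing_pred costs precedences K hpre schedule c t q
                hnd hsub htav (hcperm c hcmem) hqmem hq2 hq1
            rw [hnone, Option.none_or, ← ihc htsnd htssub]
            simp only [pvDfs, hcont, hmiss]
            rfl
          · have hmissf : pvMissingPred used t precedences = false := by
              cases h : pvMissingPred used t precedences
              · rfl
              · exact absurd h hmiss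
            have hcum1 : pvCumLoop costs (schedule ++ [t]) (0, 0)
                = (cum + (PySem.List.pyGet? costs t).getD 0,
                   if cum + (PySem.List.pyGet? costs t).getD 0 > mx
                     then cum + (PySem.List.pyGet? costs t).getD 0 else mx) := by
              rw [pvCumLoop_append, hcum]
              rfl
            by_cases hKm : (if cum + (PySem.List.pyGet? costs t).getD 0 > mx
                then cum + (PySem.List.pyGet? costs t).getD 0 else mx) > K
            · -- prefix maximum exceeds K: the whole block is infeasible
              have hnone : ((PySem.List.permutations (pvAvail costs.length (schedule ++ [t])) fuel).map
                  (fun c => schedule ++ t :: c)).findSome? (pvFeasP costs precedences K) = none := by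
                rw [List.findSome?_eq_none_iff]
                intro p hpmem
                obtain ⟨c, hcmem, rfl⟩ := List.mem_map.mp hpmem
                apply pvFeasP_none_of_cost
                have hsplit : pvCumLoop costs (schedule ++ t :: c) (0, 0)
                    = pvCumLoop costs c (pvCumLoop costs (schedule ++ [t]) (0, 0)) := by
                  have : schedule ++ t :: c = (schedule ++ [t]) ++ c := by simp
                  rw [this, pvCumLoop_append]
                rw [hsplit, hcum1]
                have := pvCumLoop_mono costs c
                  ((cum + (PySem.List.pyGet? costs t).getD 0,
                    if cum + (PySem.List.pyGet? costs t).getD 0 > mx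
                      then cum + (PySem.List.pyGet? costs t).getD 0 else mx))
                simp only at this
                omega
              rw [hnone, Option.none_or, ← ihc htsnd htssub]
              simp only [pvDfs, hcont, hmissf]
              simp only [Bool.false_eq_true, if_false, if_pos hKm]
            · -- t is placeable: recurse
              have hrec0 := ih (schedule ++ [t]) (PySem.Set.add used t)
                (cum + (PySem.List.pyGet? costs t).getD 0)
                (if cum + (PySem.List.pyGet? costs t).getD 0 > mx
                  then cum + (PySem.List.pyGet? costs t).getD 0 else mx)
                ⟨by rw [List.nodup_append]
                    refine ⟨hnd, List.nodup_singleton t, ?_⟩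
                    intro a ha
                    simp
                    intro h; subst h; exact hmem ha,
                 by intro x hx
                    rcases List.mem_append.mp hx with h | h
                    · exact hsub x h
                    · simp at h; subst h; exact htR,
                 by intro x
                    rw [PySem.Set.contains_iff, PySem.Set.mem_add, List.mem_append]
                    constructor
                    · rintro (h | h)
                      · exact Or.inl ((hused x).mp ((PySem.Set.contains_iff used x).mpr h))
                      · subst h; simp
                    · rintro (h | h)
                      · exact Or.inl ((PySem.Set.contains_iff used x).mp ((hused x).mpr h))
                      · simp at h; subst h; simp,
                 hcum1, by omega,
                 (pvPPO_append_singleton precedences schedule t).mpr ⟨hppo,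
                   fun q hq hq2 => (hused q.1).mp
                     ((pvMissingPred_false_iff used t precedences).mp hmissf q hq hq2)⟩⟩
                (by simp at hlen ⊢; omega)
              have hrec : pvDfs costs precedences K costs.length fuel
                  (PySem.List.pyRange 0 (costs.length : Int) 1) (schedule ++ [t])
                  (PySem.Set.add used t) (cum + (PySem.List.pyGet? costs t).getD 0)
                  (if cum + (PySem.List.pyGet? costs t).getD 0 > mx
                    then cum + (PySem.List.pyGet? costs t).getD 0 else mx)
                  = ((PySem.List.permutations (pvAvail costs.length (schedule ++ [t])) fuel).map
                      (fun c => (schedule ++ [t]) ++ c)).findSome? (pvFeasP costs precedences K) := by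
                rw [← hrec0]
                rfl
              clear hrec0
              have hmapfix : ((PySem.List.permutations (pvAvail costs.length (schedule ++ [t])) fuel).map
                  (fun c => (schedule ++ [t]) ++ c))
                  = ((PySem.List.permutations (pvAvail costs.length (schedule ++ [t])) fuel).map
                  (fun c => schedule ++ t :: c)) := by
                apply List.map_congr_left
                intro c _
                simp
              rw [hmapfix] at hrec
              cases hstep : pvDfs costs precedences K costs.length fuel
                  (PySem.List.pyRange 0 (costs.length : Int) 1)
                  (schedule ++ [t]) (PySem.Set.add used t)
                  (cum + (PySem.List.pyGet? costs t).getD 0)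
                  (if cum + (PySem.List.pyGet? costs t).getD 0 > mx
                    then cum + (PySem.List.pyGet? costs t).getD 0 else mx) with
              | some r =>
                have hblock : ((PySem.List.permutations (pvAvail costs.length (schedule ++ [t])) fuel).map
                    (fun c => schedule ++ t :: c)).findSome? (pvFeasP costs precedences K) = some r := by
                  rw [← hrec, hstep]
                rw [hblock]
                simp only [pvDfs, hcont, hmissf]
                simp only [Bool.false_eq_true, if_false, if_neg hKm]
                rw [hstep]
                rfl
              | none =>
                have hblock : ((PySem.List.permutations (pvAvail costs.length (schedule ++ [t])) fuel).map
                    (fun c => schedule ++ t :: c)).findSome? (pvFeasP costs precedences K) = none := by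
                  rw [← hrec, hstep]
                rw [hblock, Option.none_or, ← ihc htsnd htssub]
                simp only [pvDfs, hcont, hmissf]
                simp only [Bool.false_eq_true, if_false, if_neg hKm]
                rw [hstep]
    rw [LOOP (pvR costs.length) (pvR_nodup _) (fun _ h => h)]
    rw [pvPermutations_succ _ (pvAvail_nodup costs.length schedule) fuel]
    rw [List.map_flatMap]
    simp only [List.map_map, pvAvail_erase]
    rfl

-- ---- the 'stuck set' branch: A's scan never reaches the out-of-range pair ----

theorem pvFeasP_none_of_stuck (costs : List Int) (precedences : List (Int × Int)) (K : Int)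
    (p : List Int) (S : Finset (Fin costs.length)) (hSne : S.Nonempty)
    (hS : ∀ b ∈ S, ∃ q ∈ precedences.takeWhile (fun q =>
        decide (0 ≤ q.1 ∧ q.1 < (costs.length : Int) ∧ 0 ≤ q.2 ∧ q.2 < (costs.length : Int))),
      q.2 = ((b : Nat) : Int) ∧ ∃ a ∈ S, q.1 = ((a : Nat) : Int))
    (hp : p.Perm (pvR costs.length)) :
    pvFeasP costs precedences K p = none := by
  obtain ⟨b₀, hb₀, hmin⟩ := S.exists_min_image (fun b => p.idxOf ((b : Nat) : Int)) hSne
  obtain ⟨q, hqpre, hq2, a, haS, hq1⟩ := hS b₀ hb₀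
  have hqmem : q ∈ precedences := (List.takeWhile_prefix _).subset hqpre
  have hq1R : q.1 ∈ pvR costs.length := by
    rw [hq1]
    exact mem_pvR.mpr ⟨Int.natCast_nonneg _, by exact_mod_cast a.isLt⟩
  have hq2R : q.2 ∈ pvR costs.length := by
    rw [hq2]
    exact mem_pvR.mpr ⟨Int.natCast_nonneg _, by exact_mod_cast b₀.isLt⟩
  apply pvFeasP_none_of_violation hp hqmem (hp.mem_iff.mpr hq1R) (hp.mem_iff.mpr hq2R)
  rw [hq1, hq2]
  exact hmin a haS

theorem pvDfs_none_of_stuck (costs : List Int) (precedences : List (Int × Int)) (K : Int)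
    (S : Finset (Fin costs.length)) (hSne : S.Nonempty)
    (hS : ∀ b ∈ S, ∃ q ∈ precedences.takeWhile (fun q =>
        decide (0 ≤ q.1 ∧ q.1 < (costs.length : Int) ∧ 0 ≤ q.2 ∧ q.2 < (costs.length : Int))),
      q.2 = ((b : Nat) : Int) ∧ ∃ a ∈ S, q.1 = ((a : Nat) : Int)) :
    ∀ (fuel : Nat) (cands schedule : List Int) (used : PySem.Set Int) (cum mx : Int),
      (∀ x, PySem.Set.contains used x = true ↔ x ∈ schedule) →
      schedule.Nodup → (∀ x ∈ schedule, x ∈ pvR costs.length) →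
      (∀ x ∈ cands, x ∈ pvR costs.length) →
      (∀ b ∈ S, ((b : Nat) : Int) ∉ schedule) →
      schedule.length + fuel = costs.length →
      pvDfs costs precedences K costs.length fuel cands schedule used cum mx = none := by
  intro fuel
  induction fuel with
  | zero =>
    intro cands schedule used cum mx hused hnd hsub hcands hdisj hlen
    exfalso
    obtain ⟨b, hb⟩ := hSne
    have hperm := pvFull_perm costs.length schedule hnd hsub (by omega)
    have hbR : ((b : Nat) : Int) ∈ pvR costs.length :=
      mem_pvR.mpr ⟨Int.natCast_nonneg _, by exact_mod_cast b.isLt⟩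
    exact hdisj b hb (hperm.mem_iff.mpr hbR)
  | succ fuel ih =>
    intro cands
    induction cands with
    | nil => intro schedule used cum mx _ _ _ _ _ _; simp [pvDfs]
    | cons t ts ihc =>
      intro schedule used cum mx hused hnd hsub hcands hdisj hlen
      have htsc : ∀ x ∈ ts, x ∈ pvR costs.length := fun x hx => hcands x (by simp [hx])
      have htR : t ∈ pvR costs.length := hcands t (by simp)
      cases hcont : PySem.Set.contains used t with
      | true =>
        simp only [pvDfs, hcont]
        exact ihc schedule used cum mx hused hnd hsub htsc hdisj hlen
      | false =>
        have hmemt : t ∉ schedule := fun h => by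
          rw [(hused t).mpr h] at hcont
          exact Bool.true_eq_false.mp hcont
        by_cases htS : ∃ b ∈ S, ((b : Nat) : Int) = t
        · -- t is in the stuck set: it can never become placeable
          obtain ⟨b, hbS, hbt⟩ := htS
          obtain ⟨q, hqpre, hq2, a, haS, hq1⟩ := hS b hbS
          have hqmem : q ∈ precedences := (List.takeWhile_prefix _).subset hqpre
          have hmiss : pvMissingPred used t precedences = true := by
            cases hm : pvMissingPred used t precedences
            · exfalso
              have hc := (pvMissingPred_false_iff used t precedences).mp hm q hqmem
                (by rw [hq2, hbt])
              have : ((a : Nat) : Int) ∈ schedule := (hused _).mp (hq1 ▸ hc)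
              exact hdisj a haS this
            · rfl
          simp only [pvDfs, hcont, hmiss]
          simp only [Bool.false_eq_true, if_false, if_pos rfl]
          exact ihc schedule used cum mx hused hnd hsub htsc hdisj hlen
        · push_neg at htS
          cases hm : pvMissingPred used t precedences with
          | true =>
            simp only [pvDfs, hcont, hm]
            simp only [Bool.false_eq_true, if_false, if_pos rfl]
            exact ihc schedule used cum mx hused hnd hsub htsc hdisj hlen
          | false =>
            by_cases hKm : (if cum + (PySem.List.pyGet? costs t).getD 0 > mx
                then cum + (PySem.List.pyGet? costs t).getD 0 else mx) > K
            · simp only [pvDfs, hcont, hm]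
              simp only [Bool.false_eq_true, if_false, if_pos hKm]
              exact ihc schedule used cum mx hused hnd hsub htsc hdisj hlen
            · have hrec := ih (PySem.List.pyRange 0 (costs.length : Int) 1)
                (schedule ++ [t]) (PySem.Set.add used t)
                (cum + (PySem.List.pyGet? costs t).getD 0)
                (if cum + (PySem.List.pyGet? costs t).getD 0 > mx
                  then cum + (PySem.List.pyGet? costs t).getD 0 else mx)
                (by intro x
                    rw [PySem.Set.contains_iff, PySem.Set.mem_add, List.mem_append]
                    constructor
                    · rintro (h | h)
                      · exact Or.inl ((hused x).mp ((PySem.Set.contains_iff used x).mpr h))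
                      · subst h; simp
                    · rintro (h | h)
                      · exact Or.inl ((PySem.Set.contains_iff used x).mp ((hused x).mpr h))
                      · simp at h; subst h; simp)
                (by rw [List.nodup_append]
                    refine ⟨hnd, List.nodup_singleton t, ?_⟩
                    intro a' ha'
                    simp
                    intro h; subst h; exact hmemt ha')
                (by intro x hx
                    rcases List.mem_append.mp hx with h | h
                    · exact hsub x h
                    · simp at h; subst h; exact htR)
                (fun x h => h)
                (by intro b hb
                    rw [List.mem_append]
                    rintro (h | h)
                    · exact hdisj b hb h
                    · simp at h; exact htS b hb h)
                (by simp at hlen ⊢; omega)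
              simp only [pvDfs, hcont, hm]
              simp only [Bool.false_eq_true, if_false, if_neg hKm]
              rw [hrec]
              exact ihc schedule used cum mx hused hnd hsub htsc hdisj hlen

theorem brute_force_target_spec : Claim_equal_brute_force_target := by
  intro costs precedences K hdom hpre
  unfold Spec_brute_force_target brute_force_target brute_force_target_alt
  rw [pvSearchA_eq]
  have hRlen : (PySem.List.pyRange 0 (costs.length : Int) 1).length = costs.length := by
    have := pvR_length costs.length
    unfold pvR at this
    exact this
  rcases hpre with hpre | ⟨S, hSne, hS⟩
  · by_cases hK : K < 0
    · rw [if_pos hK]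
      have hnone : (PySem.List.permutations (PySem.List.pyRange 0 (costs.length : Int) 1)
          costs.length).findSome? (pvFeasP costs precedences K) = none :=
        List.findSome?_eq_none_iff.mpr (fun p _ => pvFeasP_none_of_K_neg hK)
      rw [hnone]
    · rw [if_neg hK]
      have h0 := pvDfs_eq costs precedences K hpre costs.length [] PySem.Set.empty 0 0
        ⟨List.nodup_nil, by simp, by intro x; simp [PySem.Set.empty], rfl, by omega, pvPPO_nil _⟩
        (by simp)
      rw [pvAvail_nil] at h0
      simp only [List.nil_append, List.map_id'] at h0
      unfold pvR at h0
      rw [h0]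
  · -- stuck branch: neither side ever produces a schedule
    have hnone : (PySem.List.permutations (PySem.List.pyRange 0 (costs.length : Int) 1)
        costs.length).findSome? (pvFeasP costs precedences K) = none := by
      apply List.findSome?_eq_none_iff.mpr
      intro p hpm
      have hp : p.Perm (pvR costs.length) := by
        unfold pvR
        apply PySem.List.perm_of_mem_permutations
        rwa [hRlen]
      exact pvFeasP_none_of_stuck costs precedences K p S hSne hS hp
    rw [hnone]
    by_cases hK : K < 0
    · rw [if_pos hK]
    · rw [if_neg hK]
      have hdfs := pvDfs_none_of_stuck costs precedences K S hSne hS costs.length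
        (PySem.List.pyRange 0 (costs.length : Int) 1) [] PySem.Set.empty 0 0
        (by intro x; simp [PySem.Set.empty]) List.nodup_nil (by simp)
        (fun x h => h) (by simp) (by simp)
      rw [hdfs]
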